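-- pv_equiv track=rewrite | github.com/fbesserer/CodeWars | Best Travel.py | choose_best_sum
-- ===== SOURCE A (Python) =====
-- from itertools import combinations
--
-- def choose_best_sum(t, k, ls):
--     highest = 0
--     for entry in combinations(ls, k):
--         cur_sum = sum(entry)
--         if highest < cur_sum < t:
--             highest = cur_sum
--         elif cur_sum == t:
--             return cur_sum
--     # return None if highest == 0 else highest
--     return highest or None
-- ===== SOURCE B (Python) =====
-- def choose_best_sum(t, k, ls):
--     n = len(ls)
--     if k < 0 or k > n:
--         return None
--     # DP depth min(k, n-k): sums of k-subsets are total minus sums of (n-k)-subsets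
--     j = n - k if 2 * k > n else k
--     # reach[c] = set of sums achievable by choosing exactly c elements
--     reach = [{0}] + [set() for _ in range(j)]
--     for x in ls:
--         for c in range(j - 1, -1, -1):
--             reach[c + 1].update(s + x for s in reach[c])
--     sums = reach[j]
--     if 2 * k > n:
--         total = sum(ls)
--         sums = {total - s for s in sums}
--     if t in sums:
--         return t
--     return max((s for s in sums if 0 < s < t), default=None)
-- ===== Notes on version B (the rewrite author's own statement) =====
-- stated objective: alternative
-- what changed: Replaced enumeration of all C(n,k) k-combinations with a subset-sum reachability DP that maintains, per element count up to min(k, n-k), the set of reachable sums (using the complement trick total-minus-sum when k > n/2), then reads the answer off the count-k sum set.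
import Mathlib
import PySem

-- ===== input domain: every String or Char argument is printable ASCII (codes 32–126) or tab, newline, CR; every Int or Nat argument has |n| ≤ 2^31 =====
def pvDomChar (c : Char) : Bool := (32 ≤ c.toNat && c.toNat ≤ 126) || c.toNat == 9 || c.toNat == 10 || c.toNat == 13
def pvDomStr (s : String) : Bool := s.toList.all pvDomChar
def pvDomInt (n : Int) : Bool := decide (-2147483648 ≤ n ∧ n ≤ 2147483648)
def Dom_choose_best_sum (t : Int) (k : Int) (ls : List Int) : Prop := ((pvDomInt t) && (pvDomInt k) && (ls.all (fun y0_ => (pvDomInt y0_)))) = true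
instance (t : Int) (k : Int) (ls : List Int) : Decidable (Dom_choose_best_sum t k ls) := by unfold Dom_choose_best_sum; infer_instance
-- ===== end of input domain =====

-- B replaces A's scan of all C(n,k) combinations by a per-count subset-sum reachability DP (alternative algorithm, similar cost).

-- ===== PORT A =====
-- itertools.combinations(ls, j): all j-element combinations, indices in lexicographic order
def pvCombos : Nat → List Int → List (List Int)
  | 0, _ => [[]]
  | _ + 1, [] => []
  | j + 1, x :: xs => (pvCombos j xs).map (fun c => x :: c) ++ pvCombos (j + 1) xs

def pvLoopA (t : Int) : List Int → Int → Option Int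
  | [], h => if h == 0 then none else some h
  | c :: rest, h =>
      if h < c ∧ c < t then pvLoopA t rest c
      else if c == t then some t
      else pvLoopA t rest h

def choose_best_sum (t : Int) (k : Int) (ls : List Int) : Option Int :=
  pvLoopA t ((pvCombos k.toNat ls).map List.sum) 0

-- ===== PORT B =====
-- pvTouch x r c = one execution of `reach[c + 1].update(s + x for s in reach[c])`
def pvTouch (x : Int) (r : List (List Int)) (c : Int) : List (List Int) :=
  PySem.List.pySetD r (c + 1)
    (PySem.Set.update (PySem.List.pyGetD r (c + 1) []) ((PySem.List.pyGetD r c []).map (fun s => s + x)))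

-- pvInner x j r = the inner loop `for c in range(j - 1, -1, -1): reach[c + 1].update(...)`
def pvInner (x : Int) (j : Nat) (r : List (List Int)) : List (List Int) :=
  (PySem.List.pyRange ((j : Int) - 1) (-1) (-1)).foldl (pvTouch x) r

def choose_best_sum_alt (t : Int) (k : Int) (ls : List Int) : Option Int :=
  if k < 0 ∨ (ls.length : Int) < k then none
  else
    -- DP depth j = min(k, n-k): sums of k-subsets are total minus sums of (n-k)-subsets
    let j : Nat := if 2 * k > (ls.length : Int) then ls.length - k.toNat else k.toNat
    let init : List (List Int) := [0] :: List.replicate j []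
    let reach := ls.foldl (fun r x => pvInner x j r) init
    let sums0 := reach.getD j []
    let sums := if 2 * k > (ls.length : Int) then PySem.Set.ofList (sums0.map (fun s => ls.sum - s)) else sums0
    if t ∈ sums then some t
    else PySem.List.max? (sums.filter (fun s => 0 < s ∧ s < t)) (fun s => s)

-- ===== PRECONDITION & SPEC =====
-- Pre_ excludes only k < 0, on which Python A raises ValueError (itertools.combinations refuses a negative r).
def Pre_choose_best_sum (t : Int) (k : Int) (ls : List Int) : Prop := 0 ≤ k
instance (t : Int) (k : Int) (ls : List Int) : Decidable (Pre_choose_best_sum t k ls) := by unfold Pre_choose_best_sum; infer_instance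
def pvWitness_choose_best_sum : Int × Int × List Int := (10, 2, [1, 2, 3])

def Spec_choose_best_sum (t : Int) (k : Int) (ls : List Int) (out : Option Int) : Prop := out = choose_best_sum_alt t k ls
instance (t : Int) (k : Int) (ls : List Int) (out : Option Int) : Decidable (Spec_choose_best_sum t k ls out) := by unfold Spec_choose_best_sum; infer_instance

-- ===== CLAIM (what is proved, stated in full; the proofs are below) =====
def Claim_equal_choose_best_sum : Prop := ∀ (t : Int) (k : Int) (ls : List Int), Dom_choose_best_sum t k ls → Pre_choose_best_sum t k ls → Spec_choose_best_sum t k ls (choose_best_sum t k ls)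

-- ===== LEMMAS AND PROOFS =====

def pvP (c : Nat) (p : List Int) (s : Int) : Prop :=
  ∃ sub : List Int, List.Sublist sub p ∧ sub.length = c ∧ sub.sum = s

theorem mem_pvCombos (j : Nat) (l sub : List Int) :
    sub ∈ pvCombos j l ↔ List.Sublist sub l ∧ sub.length = j := by
  induction l generalizing j sub with
  | nil =>
    cases j with
    | zero => simp [pvCombos]
    | succ j =>
      simp [pvCombos]
      intro h h'
      subst h; simp at h'
  | cons x xs ih =>
    cases j with
    | zero =>
      simp [pvCombos, List.length_eq_zero_iff]
      rintro rfl; exact List.nil_sublist _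
    | succ j =>
      simp [pvCombos, ih, List.sublist_cons_iff]
      constructor
      · rintro (⟨c, ⟨hs, hl⟩, rfl⟩ | ⟨hs, hl⟩)
        · exact ⟨Or.inr ⟨c, rfl, hs⟩, by simp [hl]⟩
        · exact ⟨Or.inl hs, hl⟩
      · rintro ⟨hs | ⟨r, rfl, hr⟩, hl⟩
        · exact Or.inr ⟨hs, hl⟩
        · exact Or.inl ⟨r, ⟨hr, by simpa using hl⟩, rfl⟩

theorem mem_sumsA (j : Nat) (l : List Int) (s : Int) :
    s ∈ (pvCombos j l).map List.sum ↔ pvP j l s := by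
  simp [pvP, mem_pvCombos]
  constructor
  · rintro ⟨sub, ⟨hs, hl⟩, rfl⟩; exact ⟨sub, hs, hl, rfl⟩
  · rintro ⟨sub, hs, hl, rfl⟩; exact ⟨sub, ⟨hs, hl⟩, rfl⟩

theorem pvCombos_eq_nil (j : Nat) (l : List Int) (h : l.length < j) :
    pvCombos j l = [] := by
  have : ∀ sub, sub ∉ pvCombos j l := by
    intro sub hs
    rw [mem_pvCombos] at hs
    have := hs.1.length_le
    omega
  exact List.eq_nil_iff_forall_not_mem.mpr this

theorem pvLoopA_of_mem (t : Int) (l : List Int) (h : Int) (ht : t ∈ l) :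
    pvLoopA t l h = some t := by
  induction l generalizing h with
  | nil => simp at ht
  | cons c rest ih =>
    simp [pvLoopA]
    rcases List.mem_cons.mp ht with rfl | hm
    · have : ¬ (h < t ∧ t < t) := by omega
      simp [this]
    · split_ifs with h1 h2
      · exact ih c hm
      · simp [h2]
      · exact ih h hm

theorem pvLoopA_of_not_mem (t : Int) (l : List Int) (h : Int) (ht : t ∉ l) :
    pvLoopA t l h =
      (if (l.filter (fun x => decide (x < t))).foldl max h = 0 then none
       else some ((l.filter (fun x => decide (x < t))).foldl max h)) := by
  induction l generalizing h with
  | nil => simp [pvLoopA]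
  | cons c rest ih =>
    have hct : c ≠ t := fun e => ht (e ▸ List.mem_cons_self ..)
    have hrest : t ∉ rest := fun m => ht (List.mem_cons_of_mem _ m)
    by_cases hlt : c < t
    · by_cases hh : h < c
      · have hmax : max h c = c := by omega
        simp [pvLoopA, List.filter_cons, hlt, hh, hmax, ih c hrest]
      · have hmax : max h c = h := by omega
        simp [pvLoopA, List.filter_cons, hlt, hh, hct, hmax, ih h hrest]
    · have hcond : ¬ (h < c ∧ c < t) := by omega
      simp [pvLoopA, List.filter_cons, hlt, hcond, hct, ih h hrest]

theorem foldl_max_cases (l : List Int) (h : Int) :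
    (l.foldl max h = h ∨ l.foldl max h ∈ l) ∧ h ≤ l.foldl max h ∧
      ∀ x ∈ l, x ≤ l.foldl max h := by
  induction l generalizing h with
  | nil => simp
  | cons c rest ih =>
    obtain ⟨hc, hle, hall⟩ := ih (max h c)
    refine ⟨?_, ?_, ?_⟩
    · rcases hc with e | m
      · rcases max_cases h c with ⟨e2, _⟩ | ⟨e2, _⟩ <;> simp [List.foldl_cons] <;> omega
      · simp [List.foldl_cons]; right; right; exact m
    · simp [List.foldl_cons]; omega
    · intro x hx
      rcases List.mem_cons.mp hx with rfl | hm
      · simp [List.foldl_cons]; omega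
      · simpa [List.foldl_cons] using hall x hm

theorem pvP_zero (p : List Int) (s : Int) : pvP 0 p s ↔ s = 0 := by
  unfold pvP
  constructor
  · rintro ⟨sub, _, hl, rfl⟩
    simp [List.length_eq_zero_iff.mp hl]
  · rintro rfl; exact ⟨[], List.nil_sublist _, rfl, rfl⟩

theorem pvP_succ_append (c : Nat) (p : List Int) (x s : Int) :
    pvP (c + 1) (p ++ [x]) s ↔ pvP (c + 1) p s ∨ pvP c p (s - x) := by
  constructor
  · rintro ⟨sub, hs, hl, rfl⟩
    rw [List.sublist_append_iff] at hs
    obtain ⟨l1, l2, rfl, h1, h2⟩ := hs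
    rcases List.sublist_singleton.mp h2 with rfl | rfl
    · simp at hl ⊢
      exact Or.inl ⟨l1, h1, hl, rfl⟩
    · right
      refine ⟨l1, h1, by simpa using hl, by simp⟩
  · rintro (⟨sub, hs, hl, rfl⟩ | ⟨sub, hs, hl, hsum⟩)
    · exact ⟨sub, hs.trans (List.sublist_append_left _ _), hl, rfl⟩
    · refine ⟨sub ++ [x], ?_, by simp [hl], by simp [hsum]⟩
      exact List.Sublist.append hs (List.Sublist.refl _)

def pvRowsOk (p : List Int) (c0 : Nat) (rows : List (List Int)) : Prop :=
  ∀ i, i < rows.length → ∀ s : Int, (s ∈ rows.getD i [] ↔ pvP (c0 + i) p s)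

theorem length_pvTouch (x : Int) (r : List (List Int)) (c : Int) :
    (pvTouch x r c).length = r.length := by
  unfold pvTouch
  exact PySem.List.length_pySetD ..

theorem length_foldl_pvTouch (x : Int) (cs : List Int) :
    ∀ r : List (List Int), (cs.foldl (pvTouch x) r).length = r.length := by
  induction cs with
  | nil => intro r; rfl
  | cons c cs ih =>
    intro r
    rw [List.foldl_cons, ih, length_pvTouch]

theorem length_pvInner (x : Int) (j : Nat) (r : List (List Int)) :
    (pvInner x j r).length = r.length := by
  unfold pvInner
  exact length_foldl_pvTouch x _ r

theorem getD_pvTouch (x : Int) (r : List (List Int)) (cn : Nat) (h : cn + 1 < r.length) (i : Nat) :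
    (pvTouch x r (cn : Int))[i]?.getD [] =
      if i = cn + 1 then
        PySem.Set.update (r[cn + 1]?.getD []) ((r[cn]?.getD []).map (fun s => s + x))
      else r[i]?.getD [] := by
  unfold pvTouch
  have e : (cn : Int) + 1 = ((cn + 1 : Nat) : Int) := by push_cast; ring
  rw [e, PySem.List.pySetD_natCast, PySem.List.pyGetD_natCast, PySem.List.pyGetD_natCast]
  by_cases hi : i = cn + 1
  · subst hi
    simp [List.getD, List.getElem?_set, h]
  · have hne : cn + 1 ≠ i := fun hh => hi hh.symm
    rw [if_neg hi]
    simp [List.getD, List.getElem?_set, hne]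

theorem pvInner_getD (x : Int) (j : Nat) :
    ∀ (r : List (List Int)), j < r.length → ∀ i : Nat,
    (pvInner x j r).getD i [] =
      if 1 ≤ i ∧ i ≤ j then
        PySem.Set.update (r.getD i []) ((r.getD (i - 1) []).map (fun s => s + x))
      else r.getD i [] := by
  induction j with
  | zero =>
    intro r _ i
    unfold pvInner
    rw [PySem.List.pyRange_neg_one_eq_nil (by omega)]
    have hcond : ¬ (1 ≤ i ∧ i ≤ 0) := by omega
    rw [List.foldl_nil, if_neg hcond]
  | succ j ih =>
    intro r hlen i
    unfold pvInner
    have e : ((j + 1 : Nat) : Int) - 1 = (j : Int) := by push_cast; ring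
    rw [e, PySem.List.pyRange_neg_one_cons (by omega), List.foldl_cons]
    have hlen' : j < (pvTouch x r (j : Int)).length := by rw [length_pvTouch]; omega
    have hstep := ih (pvTouch x r (j : Int)) hlen'
    show (pvInner x j (pvTouch x r (j : Int))).getD i [] = _
    rw [hstep i]
    simp only [List.getD]
    by_cases h1 : 1 ≤ i ∧ i ≤ j
    · have hii : i ≠ j + 1 := by omega
      have hi1 : i - 1 ≠ j + 1 := by omega
      have h1' : 1 ≤ i ∧ i ≤ j + 1 := by omega
      rw [if_pos h1, if_pos h1', getD_pvTouch x r j hlen i, getD_pvTouch x r j hlen (i - 1),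
        if_neg hii, if_neg hi1]
    · by_cases h2 : i = j + 1
      · subst h2
        have hne : ¬ (1 ≤ j + 1 ∧ j + 1 ≤ j) := by omega
        have hyes : 1 ≤ j + 1 ∧ j + 1 ≤ j + 1 := by omega
        rw [if_neg hne, if_pos hyes, getD_pvTouch x r j hlen (j + 1), if_pos rfl,
          Nat.add_sub_cancel]
      · have hno : ¬ (1 ≤ i ∧ i ≤ j + 1) := by omega
        rw [if_neg h1, if_neg hno, getD_pvTouch x r j hlen i, if_neg h2]

theorem pvInner_ok (p : List Int) (x : Int) (j : Nat) (rows : List (List Int))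
    (hlen : rows.length = j + 1) (hok : pvRowsOk p 0 rows) :
    pvRowsOk (p ++ [x]) 0 (pvInner x j rows) := by
  intro i hi s
  rw [length_pvInner] at hi
  rw [pvInner_getD x j rows (by omega) i]
  by_cases h1 : 1 ≤ i ∧ i ≤ j
  · rw [if_pos h1, PySem.Set.mem_update]
    have hA := hok i (by omega) s
    have e : 0 + i = (i - 1) + 1 := by omega
    have e4 : (0 : Nat) + (i - 1) = i - 1 := by omega
    rw [e, pvP_succ_append]
    constructor
    · rintro (hin | hin)
      · left
        have := hA.mp hin
        rwa [e] at this
      · obtain ⟨y, hy, rfl⟩ := List.mem_map.mp hin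
        right
        have hthis := hok (i - 1) (by omega) y
        rw [e4] at hthis
        have e3 : y + x - x = y := by ring
        rw [e3]
        exact hthis.mp hy
    · rintro (hP | hP)
      · left
        apply hA.mpr
        rwa [e]
      · right
        have hy : s - x ∈ rows.getD (i - 1) [] := by
          have hthis := hok (i - 1) (by omega) (s - x)
          rw [e4] at hthis
          exact hthis.mpr hP
        exact List.mem_map.mpr ⟨s - x, hy, by ring⟩
  · have hi0 : i = 0 := by omega
    subst hi0
    rw [if_neg h1]
    have := hok 0 (by omega) s
    simp only [Nat.add_zero] at this ⊢
    rw [this, pvP_zero, pvP_zero]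

theorem foldl_pvInner_ok (rest : List Int) (j : Nat) :
    ∀ (p : List Int) (rows : List (List Int)), rows.length = j + 1 → pvRowsOk p 0 rows →
    pvRowsOk (p ++ rest) 0 (rest.foldl (fun r x => pvInner x j r) rows) ∧
      (rest.foldl (fun r x => pvInner x j r) rows).length = j + 1 := by
  induction rest with
  | nil =>
    intro p rows hlen hok
    refine ⟨by simpa using hok, hlen⟩
  | cons x rest ih =>
    intro p rows hlen hok
    have hlen' : (pvInner x j rows).length = j + 1 := by rw [length_pvInner]; exact hlen
    have := ih (p ++ [x]) (pvInner x j rows) hlen' (pvInner_ok p x j rows hlen hok)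
    simp only [List.foldl_cons]
    constructor
    · have e : p ++ x :: rest = (p ++ [x]) ++ rest := by simp
      rw [e]
      exact this.1
    · exact this.2

theorem init_ok (k : Nat) :
    pvRowsOk [] 0 ([(0 : Int)] :: List.replicate k []) := by
  intro i hi s
  cases i with
  | zero =>
    simp only [List.getD_cons_zero]
    rw [pvP_zero]
    simp
  | succ i =>
    simp only [List.getD_cons_succ]
    have : (List.replicate k ([] : List Int)).getD i [] = [] := by
      by_cases h : i < k
      · simp [List.getD, List.getElem?_replicate, h]
      · exact List.getD_eq_default _ _ (by simp; omega)
    rw [this]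
    simp only [List.mem_nil_iff, false_iff]
    rintro ⟨sub, hs, hl, _⟩
    have hlen := List.Sublist.length_le hs
    simp only [List.length_nil] at hlen
    omega

theorem sublist_compl {l sub : List Int} (hs : List.Sublist sub l) :
    ∃ sub', List.Sublist sub' l ∧ sub'.length = l.length - sub.length ∧
      sub'.sum = l.sum - sub.sum := by
  induction hs with
  | slnil => exact ⟨[], List.nil_sublist _, rfl, by simp⟩
  | cons a hs ih =>
    obtain ⟨sub', h1, h2, h3⟩ := ih
    refine ⟨a :: sub', List.Sublist.cons₂ a h1, ?_, ?_⟩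
    · have := hs.length_le
      simp only [List.length_cons, h2]
      omega
    · simp [h3]
      ring_nf
  | cons₂ a hs ih =>
    obtain ⟨sub', h1, h2, h3⟩ := ih
    refine ⟨sub', List.Sublist.cons a h1, by simp [h2], by simp [h3]⟩

theorem pvP_total {c : Nat} {l : List Int} {s : Int} (h : pvP c l s) :
    pvP (l.length - c) l (l.sum - s) := by
  obtain ⟨sub, hs, hl, hsum⟩ := h
  obtain ⟨sub', h1, h2, h3⟩ := sublist_compl hs
  exact ⟨sub', h1, by omega, by rw [h3, hsum]⟩

theorem main_eq (t k : Int) (ls : List Int) (hk : 0 ≤ k) :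
    choose_best_sum t k ls = choose_best_sum_alt t k ls := by
  by_cases hkn : (ls.length : Int) < k
  · have hgt : ls.length < k.toNat := by omega
    rw [choose_best_sum, pvCombos_eq_nil _ _ hgt]
    simp [choose_best_sum_alt, hkn, pvLoopA]
  · have hguard : ¬ (k < 0 ∨ (ls.length : Int) < k) := by omega
    rw [choose_best_sum_alt]
    simp only [hguard, if_false]
    set kn := k.toNat with hknd
    have hkle : kn ≤ ls.length := by omega
    set jn : Nat := if 2 * k > (ls.length : Int) then ls.length - k.toNat else k.toNat with hjnd
    set rows := ls.foldl (fun r x => pvInner x jn r) ([(0:Int)] :: List.replicate jn []) with hrows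
    obtain ⟨hok, hlen⟩ := foldl_pvInner_ok ls jn [] ([(0:Int)] :: List.replicate jn [])
      (by simp) (init_ok jn)
    have hlen' : rows.length = jn + 1 := by rw [← hrows] at hlen; exact hlen
    have hmem0 : ∀ s : Int, s ∈ rows.getD jn [] ↔ pvP jn ls s := by
      intro s
      have := hok jn (by omega) s
      simpa using this
    set sums := if 2 * k > (ls.length : Int) then
        PySem.Set.ofList ((rows.getD jn []).map (fun s => ls.sum - s))
      else rows.getD jn [] with hsums
    have hmem : ∀ s : Int, s ∈ sums ↔ pvP kn ls s := by
      intro s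
      rw [hsums]
      by_cases hc : 2 * k > (ls.length : Int)
      · have hjn : jn = ls.length - kn := by rw [hjnd, hknd]; simp [hc]
        simp only [hc, if_true, PySem.Set.mem_ofList, List.mem_map]
        constructor
        · rintro ⟨y, hy, rfl⟩
          have := pvP_total ((hmem0 y).mp hy)
          have e : ls.length - jn = kn := by omega
          rwa [e] at this
        · intro hP
          refine ⟨ls.sum - s, (hmem0 _).mpr ?_, by ring⟩
          have := pvP_total hP
          rwa [← hjn] at this
      · have hjn : jn = kn := by rw [hjnd, hknd]; simp [hc]
        simp only [hc, if_false]
        rw [hmem0 s, hjn]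
    have hA : ∀ s : Int, s ∈ (pvCombos kn ls).map List.sum ↔ pvP kn ls s :=
      fun s => mem_sumsA kn ls s
    by_cases hts : t ∈ sums
    · have : t ∈ (pvCombos kn ls).map List.sum := (hA t).mpr ((hmem t).mp hts)
      rw [choose_best_sum, pvLoopA_of_mem _ _ _ this]
      simp [hts]
    · have htsA : t ∉ (pvCombos kn ls).map List.sum := fun h => hts ((hmem t).mpr ((hA t).mp h))
      rw [choose_best_sum, pvLoopA_of_not_mem _ _ _ htsA]
      simp only [hts, if_false]
      set FA := ((pvCombos kn ls).map List.sum).filter (fun x => decide (x < t)) with hFA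
      set FB := sums.filter (fun s => decide (0 < s ∧ s < t)) with hFB
      have memFA : ∀ y : Int, y ∈ FA ↔ pvP kn ls y ∧ y < t := by
        intro y; rw [hFA, List.mem_filter]; simp [hA]
      have memFB : ∀ y : Int, y ∈ FB ↔ pvP kn ls y ∧ 0 < y ∧ y < t := by
        intro y; rw [hFB, List.mem_filter]; simp [hmem]
      obtain ⟨hMc, hM0, hMall⟩ := foldl_max_cases FA 0
      set M := FA.foldl max 0 with hM
      cases hmx : PySem.List.max? FB (fun s => s) with
      | none =>
        have hFBnil : FB = [] := by rw [PySem.List.max?_eq_none_iff] at hmx; exact hmx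
        have hM0' : M = 0 := by
          rcases hMc with e | m
          · exact e
          · by_contra hne
            have h1 : 0 < M := by omega
            have h2 : M ∈ FB := (memFB M).mpr ⟨((memFA M).mp m).1, h1, ((memFA M).mp m).2⟩
            rw [hFBnil] at h2
            simp at h2
        simp [hM0']
      | some m =>
        have hmFB : m ∈ FB := PySem.List.max?_mem hmx
        have hmax := PySem.List.max?_isMax hmx
        obtain ⟨hmP, hm0, hmt⟩ := (memFB m).mp hmFB
        have hmFA : m ∈ FA := (memFA m).mpr ⟨hmP, hmt⟩
        have hle1 : m ≤ M := hMall m hmFA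
        have hMne : ¬ (M == 0) := by simp; omega
        have hMFA : M ∈ FA := by
          rcases hMc with e | mm
          · omega
          · exact mm
        have hMFB : M ∈ FB := (memFB M).mpr ⟨((memFA M).mp hMFA).1, by omega, ((memFA M).mp hMFA).2⟩
        have hle2 : M ≤ m := hmax M hMFB
        have hMm : M = m := le_antisymm hle2 hle1
        simp [hMne, hMm]
        omega

-- ===== VERDICT (by name: the statement is the Claim_ definition above) =====
theorem choose_best_sum_spec : Claim_equal_choose_best_sum := by
  intro t k ls _ hpre
  unfold Spec_choose_best_sum
  exact main_eq t k ls hpre
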